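-- pv_equiv track=rewrite | github.com/bellopsal/ChonosPlan | Simulador.py | find_lowest_positive_index
-- ===== SOURCE A (Python) =====
-- def find_lowest_positive_index(l):
--     # Find the "best" fu to put the new instruction
--     lowest_positive = None
--     lowest_positive_index = []
--
--     for i, num in enumerate(l):
--         if num >= 0 and (lowest_positive is None or num < lowest_positive):
--             lowest_positive = num
--             lowest_positive_index = [i]
--         elif num >= 0 and num == lowest_positive:
--             lowest_positive = num
--             lowest_positive_index.append(i)
--
--     return lowest_positive_index
-- ===== SOURCE B (Python) =====
-- def find_lowest_positive_index(l):
--     nonneg = [x for x in l if x >= 0]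
--     if not nonneg:
--         return []
--     m = min(nonneg)
--     return [i for i, x in enumerate(l) if x == m]
-- ===== Notes on version B (the rewrite author's own statement) =====
-- stated objective: simpler
-- what changed: Replaces the single running-min scan that rebuilds/appends an index list on the fly by a reduce-then-filter decomposition: first take the minimum of the non-negative elements (empty -> []), then one comprehension collecting the indices equal to it.
import Mathlib
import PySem

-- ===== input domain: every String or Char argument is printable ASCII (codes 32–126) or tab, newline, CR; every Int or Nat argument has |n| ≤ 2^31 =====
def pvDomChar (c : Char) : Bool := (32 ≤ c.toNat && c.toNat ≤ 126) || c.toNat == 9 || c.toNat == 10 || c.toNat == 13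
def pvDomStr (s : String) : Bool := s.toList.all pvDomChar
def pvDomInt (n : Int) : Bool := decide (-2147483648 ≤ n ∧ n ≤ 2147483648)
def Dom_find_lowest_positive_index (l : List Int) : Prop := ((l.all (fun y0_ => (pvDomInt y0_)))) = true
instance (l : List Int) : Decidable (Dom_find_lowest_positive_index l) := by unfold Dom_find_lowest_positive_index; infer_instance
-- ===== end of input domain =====

-- B replaces A's single running-min scan (which rebuilds/appends the index list on the fly)
-- by a reduce-then-filter decomposition: min of the non-negative elements, then collect its indices.

-- ===== PORT A =====
-- loop body of A: state = (lowest_positive, lowest_positive_index)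
def pvStepA (st : Option Int × List Int) (p : Int × Int) : Option Int × List Int :=
  if 0 ≤ p.2 ∧ (st.1.isNone = true ∨ p.2 < st.1.getD 0) then
    (some p.2, [p.1])
  else if 0 ≤ p.2 ∧ st.1 = some p.2 then
    (st.1, st.2 ++ [p.1])
  else st

def find_lowest_positive_index (l : List Int) : List Int :=
  ((PySem.List.enumerate l).foldl pvStepA (none, [])).2

-- ===== PORT B =====
def find_lowest_positive_index_alt (l : List Int) : List Int :=
  let nonneg := l.filter (fun x => decide (0 ≤ x))
  match PySem.List.min? nonneg (fun x => x) with
  | none => []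
  | some m => ((PySem.List.enumerate l).filter (fun p => p.2 == m)).map (fun p => p.1)

-- ===== PRECONDITION & SPEC =====
def Spec_find_lowest_positive_index (l : List Int) (out : List Int) : Prop := out = find_lowest_positive_index_alt l
instance (l : List Int) (out : List Int) : Decidable (Spec_find_lowest_positive_index l out) := by unfold Spec_find_lowest_positive_index; infer_instance

-- ===== CLAIM (what is proved, stated in full; the proofs are below) =====
def Claim_equal_find_lowest_positive_index : Prop := ∀ (l : List Int), Dom_find_lowest_positive_index l → Spec_find_lowest_positive_index l (find_lowest_positive_index l)

-- ===== LEMMAS AND PROOFS =====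

-- the minimum of the non-negative elements, as B computes it
def pvM (l : List Int) : Option Int :=
  PySem.List.min? (l.filter (fun x => decide (0 ≤ x))) (fun x => x)

-- B's output, as a function of l
def pvOut (l : List Int) : List Int :=
  match pvM l with
  | none => []
  | some m => ((PySem.List.enumerate l).filter (fun p => p.2 == m)).map (fun p => p.1)

lemma pvM_none_iff (l : List Int) : pvM l = none ↔ ∀ y ∈ l, ¬ (0 ≤ y) := by
  unfold pvM
  rw [PySem.List.min?_eq_none_iff, List.filter_eq_nil_iff]
  simp

lemma pvM_some_nonneg {l : List Int} {m : Int} (h : pvM l = some m) : 0 ≤ m := by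
  have hm := PySem.List.min?_mem h
  have := List.mem_filter.mp hm
  simpa using this.2

lemma pvM_some_le {l : List Int} {m : Int} (h : pvM l = some m) :
    ∀ y ∈ l, 0 ≤ y → m ≤ y := by
  intro y hy hy0
  have := PySem.List.min?_isMin h y (List.mem_filter.mpr ⟨hy, by simpa using hy0⟩)
  simpa using this

lemma pvM_nil_none : PySem.List.min? ([] : List Int) (fun x => x) = none :=
  (PySem.List.min?_eq_none_iff _ _).mpr rfl

lemma pvM_append (l : List Int) (x : Int) :
    pvM (l ++ [x]) =
      if 0 ≤ x then
        (match pvM l with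
         | none => some x
         | some m => some (min m x))
      else pvM l := by
  unfold pvM
  rw [List.filter_append]
  by_cases hx : 0 ≤ x
  · simp only [hx, if_pos, List.filter_cons, List.filter_nil]
    cases hnl : l.filter (fun x => decide (0 ≤ x)) with
    | nil => simp [PySem.List.min?_id_cons, pvM_nil_none]
    | cons a t =>
        simp [List.cons_append, PySem.List.min?_id_cons, List.foldl_append, List.foldl]
  · simp [hx]

lemma pv_snd_mem_of_mem_enumerate {l : List Int} {p : Int × Int}
    (hp : p ∈ PySem.List.enumerate l) : p.2 ∈ l := by
  obtain ⟨k, hk, rfl⟩ := (PySem.List.mem_enumerate_iff l 0 p).mp hp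
  exact List.getElem_mem hk

lemma pv_loop_char (l : List Int) :
    (PySem.List.enumerate l).foldl pvStepA (none, []) = (pvM l, pvOut l) := by
  induction l using List.reverseRecOn with
  | nil => simp [PySem.List.enumerate, pvM, pvOut, pvM_nil_none]
  | append_singleton l x ih =>
    have hen : PySem.List.enumerate (l ++ [x]) =
        PySem.List.enumerate l ++ [((0 + l.length : Int), x)] := by
      rw [show PySem.List.enumerate (l ++ [x]) = PySem.List.enumerate (l ++ [x]) 0 from rfl,
        PySem.List.enumerate_append]
      rfl
    rw [hen, List.foldl_append, ih]
    simp only [List.foldl]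
    by_cases hx : 0 ≤ x
    · cases hM : pvM l with
      | none =>
        -- no non-negative element in l: new state (some x, [index])
        have hall := (pvM_none_iff l).mp hM
        have hstep : pvStepA (none, pvOut l) ((0 + l.length : Int), x)
            = (some x, [(0 + l.length : Int)]) := by
          simp [pvStepA, hx]
        rw [hstep, pvM_append, hM]
        simp only [hx, if_pos]
        have hfil : (PySem.List.enumerate l).filter (fun p => p.2 == x) = [] := by
          rw [List.filter_eq_nil_iff]
          intro p hp
          have := hall p.2 (pv_snd_mem_of_mem_enumerate hp)
          simp only [beq_iff_eq]
          intro hc; exact this (hc ▸ hx)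
        simp [pvOut, pvM_append, hM, hx, hen, List.filter_append, hfil]
      | some m =>
        have hm0 := pvM_some_nonneg hM
        have hle := pvM_some_le hM
        rcases lt_trichotomy x m with hlt | heq | hgt
        · -- x is a new strict minimum
          have hstep : pvStepA (some m, pvOut l) ((0 + l.length : Int), x)
              = (some x, [(0 + l.length : Int)]) := by
            simp [pvStepA, hx, hlt]
          rw [hstep]
          have hMx : pvM (l ++ [x]) = some x := by
            rw [pvM_append, hM]; simp [hx, min_eq_right (le_of_lt hlt)]
          have hfil : (PySem.List.enumerate l).filter (fun p => p.2 == x) = [] := by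
            rw [List.filter_eq_nil_iff]
            intro p hp
            simp only [beq_iff_eq]
            intro hc
            have hmem := pv_snd_mem_of_mem_enumerate hp
            have := hle p.2 hmem (hc ▸ hx)
            omega
          simp [pvOut, hMx, hen, List.filter_append, hfil]
        · -- x equals the current minimum: index appended
          subst heq
          have hstep : pvStepA (some x, pvOut l) ((0 + l.length : Int), x)
              = (some x, pvOut l ++ [(0 + l.length : Int)]) := by
            simp [pvStepA, hx]
          rw [hstep]
          have hMx : pvM (l ++ [x]) = some x := by
            rw [pvM_append, hM]; simp [hx]
          simp [pvOut, hMx, hM, hen, List.filter_append]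
        · -- x larger than the minimum: state unchanged
          have hstep : pvStepA (some m, pvOut l) ((0 + l.length : Int), x)
              = (some m, pvOut l) := by
            have hne : ¬ m = x := by omega
            simp [pvStepA, hx, not_lt.mpr (le_of_lt hgt), hne]
          rw [hstep]
          have hMx : pvM (l ++ [x]) = some m := by
            rw [pvM_append, hM]; simp [hx, min_eq_left (le_of_lt hgt)]
          have hfil : (PySem.List.enumerate l).filter (fun p => p.2 == m) ++
              ([((0 + l.length : Int), x)].filter (fun p => p.2 == m)) =
              (PySem.List.enumerate l).filter (fun p => p.2 == m) := by
            have h1 : x ≠ m := by omega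
            simp [h1]
          rw [show (pvM l, pvOut l) = (some m, pvOut l) by rw [hM]] at *
          have hxm : ¬ x = m := by omega
          simp [pvOut, hMx, hM, hen, List.filter_append, hxm]
    · -- negative element: everything unchanged
      have hstep : pvStepA (pvM l, pvOut l) ((0 + l.length : Int), x)
          = (pvM l, pvOut l) := by
        simp [pvStepA, hx]
      rw [hstep]
      have hMx : pvM (l ++ [x]) = pvM l := by rw [pvM_append]; simp [hx]
      cases hM : pvM l with
      | none => simp [pvOut, hMx, hM]
      | some m =>
        have hm0 := pvM_some_nonneg hM
        have hne : x ≠ m := by omega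
        simp [pvOut, hMx, hM, hen, List.filter_append, hne]

-- ===== VERDICT (by name: the statement is the Claim_ definition above) =====
theorem find_lowest_positive_index_spec : Claim_equal_find_lowest_positive_index := by
  intro l _
  show find_lowest_positive_index l = find_lowest_positive_index_alt l
  have h := pv_loop_char l
  unfold find_lowest_positive_index
  rw [h]
  rfl
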